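-- pv_equiv track=rewrite | github.com/pypi-data/pypi-mirror-402 | packages/hivetracered/hivetracered-1.0.8.tar.gz/hivetracered-1.0.8/src/hivetracered/attacks/types/text_structure_modification/vertical_text_attack.py | transform
-- ===== SOURCE A (Python) =====
-- def transform(text: str) -> str:
--     """
--     Apply the vertical text transformation to the input text.
--
--     Args:
--         text: The input text to transform
--
--     Returns:
--         The text with words arranged vertically
--     """
--     # Split text into words
--     words = text.split()
--
--     # Find the maximum word length
--     max_length = max(len(word) for word in words)
--
--     # Create vertical text by stacking characters of each word
--     vertical_lines = []
--     for i in range(max_length):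
--         line = []
--         for word in words:
--             if i < len(word):
--                 line.append(word[i])
--             else:
--                 line.append(' ')
--         vertical_lines.append(' '.join(line))
--
--     return '\n'.join(vertical_lines)
-- ===== SOURCE B (Python) =====
-- def transform(text: str) -> str:
--     # Consume the words column-by-column instead of indexing: each word is kept
--     # as a reversed list of characters and each pass pops the next character of
--     # every word (space when exhausted) until all words are empty.
--     # No max() and no index arithmetic.
--     words = [list(w)[::-1] for w in text.split()]
--     lines = []
--     while any(words):
--         lines.append(' '.join(w.pop() if w else ' ' for w in words))
--     return '\n'.join(lines)
-- ===== Notes on version B (the rewrite author's own statement) =====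
-- stated objective: alternative
-- what changed: B replaces A's index-based double loop (range over max word length, bounds check, word[i]) by keeping each word as a reversed character list and destructively popping the next character of every word each pass until all words are exhausted, so no max() and no indexing occur.
-- outside the precondition, e.g. on transform('  '): A raises ValueError, B returns ''; on transform(''): A raises ValueError, B returns ''
-- crash fix: On text with no words (empty or all-whitespace) A raises ValueError from max() on an empty sequence; B returns ''. — e.g. on transform(" "): A raises ValueError, B returns ""
import Mathlib
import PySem

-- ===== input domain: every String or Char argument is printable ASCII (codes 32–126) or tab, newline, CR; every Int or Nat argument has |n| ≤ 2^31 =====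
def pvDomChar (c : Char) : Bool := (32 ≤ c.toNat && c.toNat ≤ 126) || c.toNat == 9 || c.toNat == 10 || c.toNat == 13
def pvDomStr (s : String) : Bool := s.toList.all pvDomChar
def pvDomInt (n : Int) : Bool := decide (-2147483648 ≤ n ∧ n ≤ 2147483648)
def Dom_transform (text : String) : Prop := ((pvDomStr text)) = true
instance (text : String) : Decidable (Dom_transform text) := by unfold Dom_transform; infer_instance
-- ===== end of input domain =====

-- B consumes the words column-by-column, popping the next character of every
-- (reversed) word per pass, instead of A's index-based double loop; same return
-- value wherever A returns (B mutates only its own local lists).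

-- ===== PORT A =====
def transform (text : String) : String :=
  let words := PySem.Str.split₀ text
  match PySem.List.max? (words.map PySem.Str.len) id with
  | none => ""   -- Python raises ValueError here (max() of empty); excluded by Pre_
  | some maxLength =>
    let verticalLines := (PySem.List.pyRange 0 maxLength 1).foldl
      (fun acc i => acc ++ [PySem.Str.join " "
        (words.foldl (fun line w =>
          line ++ [if i < PySem.Str.len w
                   then String.ofList [(PySem.Str.pyGet? w i).getD ' ']
                   else " "]) [])]) []
    PySem.Str.join "\n" verticalLines

-- ===== PORT B =====
-- termination helpers for the while-loop (total characters remaining decrease)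
theorem pvSumDropLastLe (ws : List (List Char)) :
    ((ws.map (fun w => w.dropLast)).map List.length).sum ≤ (ws.map List.length).sum := by
  induction ws with
  | nil => simp
  | cons w ws ih => simp only [List.map_cons, List.sum_cons, List.length_dropLast]; omega

theorem pvSumDropLastLt (ws : List (List Char))
    (h : ws.any (fun w => !w.isEmpty) = true) :
    ((ws.map (fun w => w.dropLast)).map List.length).sum < (ws.map List.length).sum := by
  induction ws with
  | nil => simp at h
  | cons w ws ih =>
    simp only [List.any_cons, Bool.or_eq_true] at h
    simp only [List.map_cons, List.sum_cons, List.length_dropLast]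
    rcases h with h | h
    · have := pvSumDropLastLe ws
      have hw : w ≠ [] := by simpa [List.isEmpty_iff] using h
      have : 0 < w.length := List.length_pos_iff.mpr hw
      omega
    · have := ih h; omega

-- each word is kept reversed; 'w.pop()' is getLast?/dropLast on the reversed word
def transformAltLoop (ws : List (List Char)) (lines : List String) : List String :=
  if _h : ws.any (fun w => !w.isEmpty) = true then
    transformAltLoop (ws.map (fun w => w.dropLast))
      (lines ++ [PySem.Str.join " " (ws.map (fun w =>
        match w.getLast? with
        | none => " "
        | some c => String.ofList [c]))])
  else lines
termination_by (ws.map List.length).sum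
decreasing_by
  simp only [List.map_subtype, List.unattach_attach]
  exact pvSumDropLastLt ws _h

def transform_alt (text : String) : String :=
  let words := (PySem.Str.split₀ text).map (fun w => w.toList.reverse)
  PySem.Str.join "\n" (transformAltLoop words [])

-- ===== PRECONDITION & SPEC =====
-- Pre_ excludes exactly the inputs with no words (empty/all-whitespace text), on which A raises ValueError.
def Pre_transform (text : String) : Prop := PySem.Str.split₀ text ≠ []
instance (text : String) : Decidable (Pre_transform text) := by unfold Pre_transform; infer_instance
def pvWitness_transform : String := "ab c"

-- On text with no words A raises ValueError (max() of an empty sequence); B returns "".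
def Raises_transform (text : String) : Prop := PySem.Str.split₀ text = []
instance (text : String) : Decidable (Raises_transform text) := by unfold Raises_transform; infer_instance
def pvRaiseWitness_transform : String := "  "
def pvRaiseWitnessOut_transform : String := ""

def Spec_transform (text : String) (out : String) : Prop := out = transform_alt text
instance (text : String) (out : String) : Decidable (Spec_transform text out) := by unfold Spec_transform; infer_instance

-- ===== CLAIM (what is proved, stated in full; the proofs are below) =====
def Claim_equal_transform : Prop := ∀ (text : String), Dom_transform text → Pre_transform text → Spec_transform text (transform text)
def Claim_raises_transform : Prop := (∀ (text : String), Dom_transform text → Raises_transform text → ¬ Pre_transform text) ∧ (Dom_transform (pvRaiseWitness_transform) ∧ Raises_transform (pvRaiseWitness_transform) ∧ transform_alt (pvRaiseWitness_transform) = pvRaiseWitnessOut_transform)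

-- ===== LEMMAS AND PROOFS =====

-- the running maximum of word lengths, as a Nat
def pvNatMax (ws : List (List Char)) : Nat := ws.foldl (fun n w => Nat.max n w.length) 0

theorem pvFoldMaxShift (ws : List (List Char)) :
    ∀ a : Nat, ws.foldl (fun n w => Nat.max n w.length) a = Nat.max a (pvNatMax ws) := by
  induction ws with
  | nil => intro a; simp [pvNatMax]
  | cons w ws ih =>
    intro a
    simp only [pvNatMax, List.foldl_cons]
    rw [ih (a.max w.length), ih (Nat.max 0 w.length)]
    simp only [Nat.max_def]
    split_ifs <;> omega

theorem pvNatMax_pos_iff (ws : List (List Char)) :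
    ws.any (fun w => !w.isEmpty) = true ↔ 0 < pvNatMax ws := by
  induction ws with
  | nil => simp [pvNatMax]
  | cons w ws ih =>
    simp only [List.any_cons, Bool.or_eq_true]
    rw [pvNatMax, List.foldl_cons, pvFoldMaxShift]
    have h1 : ((!w.isEmpty) = true) ↔ 0 < w.length := by
      simp [List.length_pos_iff]
    have h2 : 0 < (Nat.max 0 w.length).max (pvNatMax ws) ↔ 0 < w.length ∨ 0 < pvNatMax ws := by
      simp only [Nat.max_def]
      split_ifs <;> omega
    rw [h2]
    exact or_congr h1 ih

theorem pvFoldMaxPred (ws : List (List Char)) :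
    ∀ a : Nat, ws.foldl (fun n w => Nat.max n (w.length - 1)) (a - 1)
      = ws.foldl (fun n w => Nat.max n w.length) a - 1 := by
  induction ws with
  | nil => intro a; rfl
  | cons w ws ih =>
    intro a
    simp only [List.foldl_cons]
    have hmax : Nat.max (a - 1) (w.length - 1) = Nat.max a w.length - 1 := by
      simp only [Nat.max_def]
      split_ifs <;> omega
    rw [hmax, ih]

theorem pvNatMax_drop (ws : List (List Char)) :
    pvNatMax (ws.map (fun w => w.drop 1)) = pvNatMax ws - 1 := by
  simp only [pvNatMax, List.foldl_map, List.length_drop]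
  have := pvFoldMaxPred ws 0
  simpa using this

theorem pvLoop_eq : ∀ (n : Nat) (ws : List (List Char)) (lines : List String),
    pvNatMax ws = n →
    transformAltLoop (ws.map List.reverse) lines = lines ++ (List.range n).map (fun k =>
      PySem.Str.join " " ((ws.map (fun w => w.drop k)).map (fun w =>
        match w with
        | [] => " "
        | c :: _ => String.ofList [c]))) := by
  intro n
  induction n with
  | zero =>
    intro ws lines h
    unfold transformAltLoop
    have hno : ¬ ws.any (fun w => !w.isEmpty) = true := by
      rw [pvNatMax_pos_iff, h]; omega
    have hno' : ¬ (ws.map List.reverse).any (fun w => !w.isEmpty) = true := by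
      simpa [List.any_map, Function.comp_def, List.isEmpty_reverse] using hno
    simp [hno']
  | succ n ih =>
    intro ws lines h
    have hany : ws.any (fun w => !w.isEmpty) = true := by
      rw [pvNatMax_pos_iff, h]; omega
    have hany' : (ws.map List.reverse).any (fun w => !w.isEmpty) = true := by
      simpa [List.any_map, Function.comp_def, List.isEmpty_reverse] using hany
    have harg : (ws.map List.reverse).map (fun w => w.dropLast)
        = (ws.map (fun w => w.drop 1)).map List.reverse := by
      simp only [List.map_map]
      apply List.map_congr_left
      intro w _
      simp [Function.comp_apply, List.dropLast_reverse, List.drop_one]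
    rw [transformAltLoop, dif_pos hany', harg,
      ih (ws.map (fun w => w.drop 1)) _ (by rw [pvNatMax_drop, h]; omega)]
    rw [List.range_succ_eq_map, List.map_cons, List.append_assoc,
      List.singleton_append]
    congr 1
    refine congrArg₂ List.cons ?_ ?_
    · congr 1
      rw [List.map_map, List.map_map]
      apply List.map_congr_left
      intro w _
      simp only [Function.comp_apply, List.getLast?_reverse, List.drop_zero]
      cases w <;> rfl
    · rw [List.map_map]
      apply List.map_congr_left
      intro k _
      simp only [Function.comp_apply]
      congr 1
      rw [List.map_map, List.map_map, List.map_map]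
      apply List.map_congr_left
      intro w _
      simp only [Function.comp_apply]
      congr 1
      rw [List.drop_drop]
      congr 1
      omega

theorem pvMax?_int : ∀ (l : List Int) (x : Int),
    PySem.List.max? (x :: l) id = some (l.foldl max x) := by
  intro l
  induction l with
  | nil => intro x; rfl
  | cons y l ih =>
    intro x
    simp only [PySem.List.max?, List.foldl_cons, id_eq] at ih ⊢
    by_cases hxy : x < y
    · rw [if_pos hxy, max_eq_right hxy.le]
      exact ih y
    · rw [if_neg hxy, max_eq_left (not_lt.mp hxy)]
      exact ih x

theorem pvCastFold (rest : List String) : ∀ a : Nat,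
    ((rest.foldl (fun n w => Nat.max n w.toList.length) a : Nat) : Int)
      = (rest.map PySem.Str.len).foldl max (a : Int) := by
  induction rest with
  | nil => intro a; rfl
  | cons w rest ih =>
    intro a
    simp only [List.map_cons, List.foldl_cons, PySem.Str.len_eq]
    rw [← Nat.cast_max]
    exact ih _

theorem pvMaxLen (w : String) (rest : List String) :
    PySem.List.max? (((w :: rest).map PySem.Str.len)) id
      = some ((pvNatMax ((w :: rest).map String.toList) : Nat) : Int) := by
  rw [List.map_cons, pvMax?_int]
  congr 1
  rw [List.map_cons, pvNatMax]
  simp only [List.foldl_map, List.foldl_cons]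
  have hz : Nat.max 0 w.toList.length = w.toList.length := by
    simp only [Nat.max_def]
    split_ifs <;> omega
  rw [hz, pvCastFold rest w.toList.length, PySem.Str.len_eq, List.foldl_map]

theorem pvCell (w : String) (k : Nat) :
    (if (k : Int) < PySem.Str.len w
     then String.ofList [(PySem.Str.pyGet? w (k : Int)).getD ' ']
     else " ")
    = (match w.toList.drop k with
       | [] => " "
       | c :: _ => String.ofList [c]) := by
  by_cases h : k < w.toList.length
  · have hlt : (k : Int) < PySem.Str.len w := by
      rw [PySem.Str.len_eq]; exact_mod_cast h
    rw [if_pos hlt]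
    have hd : w.toList.drop k = w.toList[k] :: w.toList.drop (k + 1) :=
      (List.getElem_cons_drop h).symm
    rw [hd]
    simp [List.getElem?_eq_getElem h]
  · have hge : ¬ (k : Int) < PySem.Str.len w := by
      rw [PySem.Str.len_eq]; exact_mod_cast h
    rw [if_neg hge, List.drop_eq_nil_of_le (by omega)]

-- ===== VERDICT (by name: the statement is the Claim_ definition above) =====
theorem transform_spec : Claim_equal_transform := by
  intro text _ hpre
  obtain ⟨w, rest, hw⟩ : ∃ w rest, PySem.Str.split₀ text = w :: rest := by
    rcases h : PySem.Str.split₀ text with _ | ⟨w, rest⟩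
    · exact absurd h hpre
    · exact ⟨w, rest, rfl⟩
  simp only [Spec_transform, transform, transform_alt, hw]
  rw [pvMaxLen]
  have hmaps : (w :: rest).map (fun v => v.toList.reverse)
      = ((w :: rest).map String.toList).map List.reverse := by
    simp [List.map_map]
  rw [hmaps, pvLoop_eq (pvNatMax ((w :: rest).map String.toList)) _ _ rfl]
  simp only [List.nil_append]
  rw [PySem.List.pyRange_zero_nat]
  rw [List.foldl_map, PySem.List.foldl_append_singleton_eq_map]
  simp only [List.nil_append, List.map_map]
  apply congrArg
  apply List.map_congr_left
  intro k _
  rw [PySem.List.foldl_append_singleton_eq_map]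
  apply congrArg
  rw [List.nil_append]
  apply List.map_congr_left
  intro v _
  simp only [Function.comp_apply]
  exact pvCell v k

@[simp]
theorem transform_raises : Claim_raises_transform := by
  unfold Claim_raises_transform
  refine ⟨fun text _ hr hp => hp hr, by decide, by decide, ?_⟩
  have h : PySem.Str.split₀ pvRaiseWitness_transform = [] := by decide
  simp only [transform_alt, h, List.map_nil]
  have h2 : transformAltLoop [] [] = [] := by
    unfold transformAltLoop
    simp
  rw [h2]
  decide
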